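-- pv_equiv track=rewrite | github.com/asitkuma/POTD | coverage_of_all_zeros_in_binary_matrix.py | findCoverage
-- ===== SOURCE A (Python) =====
-- def findCoverage(matrix):
-- 	# Code here
-- 	ans=0
-- 	for i in range(len(matrix)):
-- 	    for j in range(len(matrix[0])):
-- 	        if matrix[i][j]==0:
-- 	            if i-1>-1:
-- 	                if matrix[i-1][j]==1:
-- 	                    ans+=1
-- 	            if j-1>-1:
-- 	                if matrix[i][j-1]==1:
-- 	                    ans+=1
-- 	            if i+1<len(matrix):
-- 	                if matrix[i+1][j]==1:
-- 	                    ans+=1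
-- 	            if j+1<len(matrix[0]):
-- 	                if matrix[i][j+1]==1:
-- 	                    ans+=1
-- 	return ans
-- ===== SOURCE B (Python) =====
-- def findCoverage(matrix):
--     # Count each adjacent (0,1) pair once by scanning right/down edges only.
--     if not matrix:
--         return 0
--     m, n = len(matrix), len(matrix[0])
--     ans = 0
--     for i in range(m):
--         for j in range(n - 1):
--             a, b = matrix[i][j], matrix[i][j + 1]
--             if (a == 0 and b == 1) or (a == 1 and b == 0):
--                 ans += 1
--     for i in range(m - 1):
--         for j in range(n):
--             a, b = matrix[i][j], matrix[i + 1][j]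
--             if (a == 0 and b == 1) or (a == 1 and b == 0):
--                 ans += 1
--     return ans
-- ===== Notes on version B (the rewrite author's own statement) =====
-- stated objective: alternative
-- what changed: B counts each adjacent 0/1 pair once by scanning only right and down neighbours (one pass over grid edges) instead of A's per-0-cell inspection of all four neighbours; Pre_ excludes jagged matrices whose some row is shorter than row 0, on which A raises IndexError.
import Mathlib
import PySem

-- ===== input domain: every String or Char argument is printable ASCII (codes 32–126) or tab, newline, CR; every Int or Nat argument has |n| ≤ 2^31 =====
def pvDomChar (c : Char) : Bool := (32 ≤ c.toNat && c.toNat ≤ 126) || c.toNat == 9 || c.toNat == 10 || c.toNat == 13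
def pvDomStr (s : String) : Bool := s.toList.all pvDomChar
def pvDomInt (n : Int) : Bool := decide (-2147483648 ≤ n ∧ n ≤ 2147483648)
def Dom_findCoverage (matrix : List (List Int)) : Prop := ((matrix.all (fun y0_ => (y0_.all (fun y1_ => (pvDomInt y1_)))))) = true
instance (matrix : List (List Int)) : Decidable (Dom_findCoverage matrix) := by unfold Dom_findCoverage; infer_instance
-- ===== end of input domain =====

-- B counts each adjacent 0/1 pair once by scanning only right/down neighbours (edge pass) instead of A's four-neighbour check per 0 cell; same asymptotic cost.


-- ===== PORT A =====
def findCoverage (matrix : List (List Int)) : Int :=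
  (PySem.List.pyRange 0 (matrix.length : Int) 1).foldl (fun ans i =>
    (PySem.List.pyRange 0 ((PySem.List.pyGetD matrix 0 []).length : Int) 1).foldl (fun ans j =>
      if PySem.List.pyGetD (PySem.List.pyGetD matrix i []) j 0 = 0 then
        ans
        + (if i - 1 > -1 ∧ PySem.List.pyGetD (PySem.List.pyGetD matrix (i - 1) []) j 0 = 1 then 1 else 0)
        + (if j - 1 > -1 ∧ PySem.List.pyGetD (PySem.List.pyGetD matrix i []) (j - 1) 0 = 1 then 1 else 0)
        + (if i + 1 < (matrix.length : Int) ∧ PySem.List.pyGetD (PySem.List.pyGetD matrix (i + 1) []) j 0 = 1 then 1 else 0)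
        + (if j + 1 < ((PySem.List.pyGetD matrix 0 []).length : Int) ∧ PySem.List.pyGetD (PySem.List.pyGetD matrix i []) (j + 1) 0 = 1 then 1 else 0)
      else ans) ans) 0

-- ===== PORT B =====
def findCoverage_alt (matrix : List (List Int)) : Int :=
  if matrix = [] then 0
  else
    let m : Int := matrix.length
    let n : Int := (PySem.List.pyGetD matrix 0 []).length
    let ans : Int := (PySem.List.pyRange 0 m 1).foldl (fun ans i =>
      (PySem.List.pyRange 0 (n - 1) 1).foldl (fun ans j =>
        let a := PySem.List.pyGetD (PySem.List.pyGetD matrix i []) j 0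
        let b := PySem.List.pyGetD (PySem.List.pyGetD matrix i []) (j + 1) 0
        if (a = 0 ∧ b = 1) ∨ (a = 1 ∧ b = 0) then ans + 1 else ans) ans) 0
    (PySem.List.pyRange 0 (m - 1) 1).foldl (fun ans i =>
      (PySem.List.pyRange 0 n 1).foldl (fun ans j =>
        let a := PySem.List.pyGetD (PySem.List.pyGetD matrix i []) j 0
        let b := PySem.List.pyGetD (PySem.List.pyGetD matrix (i + 1) []) j 0
        if (a = 0 ∧ b = 1) ∨ (a = 1 ∧ b = 0) then ans + 1 else ans) ans) ans

-- ===== PRECONDITION & SPEC =====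
-- Pre_ excludes jagged matrices with some row shorter than row 0: there Python A raises IndexError.
def Pre_findCoverage (matrix : List (List Int)) : Prop :=
  ∀ row ∈ matrix, (matrix.headI).length ≤ row.length
instance (matrix : List (List Int)) : Decidable (Pre_findCoverage matrix) := by unfold Pre_findCoverage; infer_instance
def pvWitness_findCoverage : List (List Int) := [[0, 1], [1, 0]]
def Spec_findCoverage (matrix : List (List Int)) (out : Int) : Prop := out = findCoverage_alt matrix
instance (matrix : List (List Int)) (out : Int) : Decidable (Spec_findCoverage matrix out) := by unfold Spec_findCoverage; infer_instance

-- ===== CLAIM (what is proved, stated in full; the proofs are below) =====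
def Claim_equal_findCoverage : Prop := ∀ (matrix : List (List Int)), Dom_findCoverage matrix → Pre_findCoverage matrix → Spec_findCoverage matrix (findCoverage matrix)

-- ===== LEMMAS AND PROOFS =====

-- the cell value both ports read (out-of-range = default 0)
def pvCell (M : List (List Int)) (i j : Nat) : Int := (M.getD i []).getD j 0

theorem pv_sum_map_range (f : Nat → Int) (n : Nat) :
    ((List.range n).map f).sum = ∑ i ∈ Finset.range n, f i := by
  induction n with
  | zero => simp
  | succ n ih => simp [List.range_succ, Finset.sum_range_succ, ih]

theorem pv_shift (Q : Nat → Prop) [DecidablePred Q] (m : Nat) :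
    (∑ i ∈ Finset.range m, (if 1 ≤ i ∧ Q i then (1 : Int) else 0))
      = ∑ i ∈ Finset.range (m - 1), (if Q (i + 1) then (1 : Int) else 0) := by
  cases m with
  | zero => simp
  | succ m =>
    rw [Finset.sum_range_succ']
    simp

theorem pv_cut (R : Nat → Prop) [DecidablePred R] (m : Nat) :
    (∑ i ∈ Finset.range m, (if i + 1 < m ∧ R i then (1 : Int) else 0))
      = ∑ i ∈ Finset.range (m - 1), (if R i then (1 : Int) else 0) := by
  cases m with
  | zero => simp
  | succ m =>
    rw [Finset.sum_range_succ]
    simp only [Nat.add_sub_cancel]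
    have : ∀ i ∈ Finset.range m, (if i + 1 < m + 1 ∧ R i then (1 : Int) else 0) = (if R i then (1 : Int) else 0) := by
      intro i hi
      have := Finset.mem_range.mp hi
      have h1 : i + 1 < m + 1 := by omega
      simp [h1]
    rw [Finset.sum_congr rfl this]
    simp

theorem pv_merge (p q : Prop) [Decidable p] [Decidable q] (h : ¬(p ∧ q)) :
    (if p then (1 : Int) else 0) + (if q then (1 : Int) else 0) = if p ∨ q then (1 : Int) else 0 := by
  split_ifs <;> tauto

-- one-dimensional core: backward+forward 0→1 indicators equal the single edge pass
theorem pv_key1D (c : Nat → Int) (m : Nat) :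
    (∑ i ∈ Finset.range m,
        ((if 1 ≤ i ∧ (c i = 0 ∧ c (i - 1) = 1) then (1 : Int) else 0)
          + (if i + 1 < m ∧ (c i = 0 ∧ c (i + 1) = 1) then (1 : Int) else 0)))
      = ∑ i ∈ Finset.range (m - 1),
          (if (c i = 0 ∧ c (i + 1) = 1) ∨ (c i = 1 ∧ c (i + 1) = 0) then (1 : Int) else 0) := by
  rw [Finset.sum_add_distrib, pv_shift (fun i => c i = 0 ∧ c (i - 1) = 1) m,
      pv_cut (fun i => c i = 0 ∧ c (i + 1) = 1) m, ← Finset.sum_add_distrib]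
  apply Finset.sum_congr rfl
  intro i _
  have h : ¬((c (i + 1) = 0 ∧ c (i + 1 - 1) = 1) ∧ (c i = 0 ∧ c (i + 1) = 1)) := by
    simp only [Nat.add_sub_cancel]
    rintro ⟨⟨h1, h2⟩, ⟨h3, h4⟩⟩
    rw [h1] at h4; exact absurd h4 (by norm_num)
  rw [pv_merge _ _ h]
  simp only [Nat.add_sub_cancel]
  apply if_congr _ rfl rfl
  tauto

-- per-cell integer-indexed bodies of the two ports
def pv_gA (M : List (List Int)) (i j : Int) : Int :=
  if PySem.List.pyGetD (PySem.List.pyGetD M i []) j 0 = 0 then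
    (if i - 1 > -1 ∧ PySem.List.pyGetD (PySem.List.pyGetD M (i - 1) []) j 0 = 1 then 1 else 0)
    + (if j - 1 > -1 ∧ PySem.List.pyGetD (PySem.List.pyGetD M i []) (j - 1) 0 = 1 then 1 else 0)
    + (if i + 1 < (M.length : Int) ∧ PySem.List.pyGetD (PySem.List.pyGetD M (i + 1) []) j 0 = 1 then 1 else 0)
    + (if j + 1 < ((PySem.List.pyGetD M 0 []).length : Int) ∧ PySem.List.pyGetD (PySem.List.pyGetD M i []) (j + 1) 0 = 1 then 1 else 0)
  else 0

def pv_gH (M : List (List Int)) (i j : Int) : Int :=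
  if (PySem.List.pyGetD (PySem.List.pyGetD M i []) j 0 = 0 ∧ PySem.List.pyGetD (PySem.List.pyGetD M i []) (j + 1) 0 = 1)
      ∨ (PySem.List.pyGetD (PySem.List.pyGetD M i []) j 0 = 1 ∧ PySem.List.pyGetD (PySem.List.pyGetD M i []) (j + 1) 0 = 0)
  then 1 else 0

def pv_gV (M : List (List Int)) (i j : Int) : Int :=
  if (PySem.List.pyGetD (PySem.List.pyGetD M i []) j 0 = 0 ∧ PySem.List.pyGetD (PySem.List.pyGetD M (i + 1) []) j 0 = 1)
      ∨ (PySem.List.pyGetD (PySem.List.pyGetD M i []) j 0 = 1 ∧ PySem.List.pyGetD (PySem.List.pyGetD M (i + 1) []) j 0 = 0)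
  then 1 else 0

theorem pv_gA_cast (M : List (List Int)) (i j : Nat) :
    pv_gA M (i : Int) (j : Int)
      = ((if 1 ≤ i ∧ (pvCell M i j = 0 ∧ pvCell M (i - 1) j = 1) then (1 : Int) else 0)
          + (if 1 ≤ j ∧ (pvCell M i j = 0 ∧ pvCell M i (j - 1) = 1) then (1 : Int) else 0)
          + (if i + 1 < M.length ∧ (pvCell M i j = 0 ∧ pvCell M (i + 1) j = 1) then (1 : Int) else 0)
          + (if j + 1 < (M.getD 0 []).length ∧ (pvCell M i j = 0 ∧ pvCell M i (j + 1) = 1) then (1 : Int) else 0)) := by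
  unfold pv_gA pvCell
  have hget0 : PySem.List.pyGetD M 0 [] = M.getD 0 [] := by
    simpa using PySem.List.pyGetD_natCast M 0 []
  rw [hget0]
  simp only [PySem.List.pyGetD_natCast]
  have hU : ((i : Int) - 1 > -1 ∧ (PySem.List.pyGetD M ((i : Int) - 1) []).getD j 0 = 1)
      ↔ (1 ≤ i ∧ (M.getD (i - 1) []).getD j 0 = 1) := by
    rcases Nat.eq_zero_or_pos i with h0 | h0
    · subst h0
      exact ⟨fun ⟨h, _⟩ => absurd h (by omega), fun ⟨h, _⟩ => absurd h (by omega)⟩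
    · have e1 : ((i : Int) - 1) = ((i - 1 : Nat) : Int) := by omega
      rw [e1, PySem.List.pyGetD_natCast]
      exact ⟨fun ⟨_, h⟩ => ⟨h0, h⟩, fun ⟨_, h⟩ => ⟨by omega, h⟩⟩
  have hL : ((j : Int) - 1 > -1 ∧ PySem.List.pyGetD (M.getD i []) ((j : Int) - 1) 0 = 1)
      ↔ (1 ≤ j ∧ (M.getD i []).getD (j - 1) 0 = 1) := by
    rcases Nat.eq_zero_or_pos j with h0 | h0
    · subst h0
      exact ⟨fun ⟨h, _⟩ => absurd h (by omega), fun ⟨h, _⟩ => absurd h (by omega)⟩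
    · have e1 : ((j : Int) - 1) = ((j - 1 : Nat) : Int) := by omega
      rw [e1, PySem.List.pyGetD_natCast]
      exact ⟨fun ⟨_, h⟩ => ⟨h0, h⟩, fun ⟨_, h⟩ => ⟨by omega, h⟩⟩
  have hD : ((i : Int) + 1 < (M.length : Int) ∧ (PySem.List.pyGetD M ((i : Int) + 1) []).getD j 0 = 1)
      ↔ (i + 1 < M.length ∧ (M.getD (i + 1) []).getD j 0 = 1) := by
    have e1 : ((i : Int) + 1) = ((i + 1 : Nat) : Int) := by push_cast; ring
    rw [e1, PySem.List.pyGetD_natCast]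
    exact and_congr (by omega) Iff.rfl
  have hR : ((j : Int) + 1 < ((M.getD 0 []).length : Int) ∧ PySem.List.pyGetD (M.getD i []) ((j : Int) + 1) 0 = 1)
      ↔ (j + 1 < (M.getD 0 []).length ∧ (M.getD i []).getD (j + 1) 0 = 1) := by
    have e1 : ((j : Int) + 1) = ((j + 1 : Nat) : Int) := by push_cast; ring
    rw [e1, PySem.List.pyGetD_natCast]
    exact and_congr (by omega) Iff.rfl
  rw [if_congr hU rfl rfl, if_congr hL rfl rfl, if_congr hD rfl rfl, if_congr hR rfl rfl]
  by_cases hz : (M.getD i []).getD j 0 = 0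
  · rw [if_pos hz]
    simp only [hz, true_and]
  · rw [if_neg hz]
    simp only [hz, false_and, and_false, if_false, add_zero]

theorem pv_gH_cast (M : List (List Int)) (i j : Nat) :
    pv_gH M (i : Int) (j : Int)
      = (if (pvCell M i j = 0 ∧ pvCell M i (j + 1) = 1) ∨ (pvCell M i j = 1 ∧ pvCell M i (j + 1) = 0) then (1 : Int) else 0) := by
  unfold pv_gH pvCell
  have e : ((j : Int) + 1) = ((j + 1 : Nat) : Int) := by push_cast; ring
  rw [e]
  simp only [PySem.List.pyGetD_natCast]

theorem pv_gV_cast (M : List (List Int)) (i j : Nat) :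
    pv_gV M (i : Int) (j : Int)
      = (if (pvCell M i j = 0 ∧ pvCell M (i + 1) j = 1) ∨ (pvCell M i j = 1 ∧ pvCell M (i + 1) j = 0) then (1 : Int) else 0) := by
  unfold pv_gV pvCell
  have e : ((i : Int) + 1) = ((i + 1 : Nat) : Int) := by push_cast; ring
  rw [e]
  simp only [PySem.List.pyGetD_natCast]

-- turn a foldl over pyRange 0 n 1 of conditional increments into a Finset sum
theorem pv_foldl_sum (g : Int → Int) (n : Nat) (a : Int) :
    (PySem.List.pyRange 0 (n : Int) 1).foldl (fun acc x => acc + g x) a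
      = a + ∑ k ∈ Finset.range n, g (k : Int) := by
  rw [PySem.List.foldl_add, PySem.List.pyRange_one]
  have h0 : ((n : Int) - 0).toNat = n := by omega
  rw [h0, List.map_map, pv_sum_map_range]
  simp

-- A as a double Finset sum of four indicators
theorem pv_A_eq (M : List (List Int)) :
    findCoverage M
      = ∑ i ∈ Finset.range M.length, ∑ j ∈ Finset.range (M.getD 0 []).length,
          ((if 1 ≤ i ∧ (pvCell M i j = 0 ∧ pvCell M (i - 1) j = 1) then (1 : Int) else 0)
            + (if 1 ≤ j ∧ (pvCell M i j = 0 ∧ pvCell M i (j - 1) = 1) then (1 : Int) else 0)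
            + (if i + 1 < M.length ∧ (pvCell M i j = 0 ∧ pvCell M (i + 1) j = 1) then (1 : Int) else 0)
            + (if j + 1 < (M.getD 0 []).length ∧ (pvCell M i j = 0 ∧ pvCell M i (j + 1) = 1) then (1 : Int) else 0)) := by
  have hfun : (fun (ans i : Int) =>
      (PySem.List.pyRange 0 ((PySem.List.pyGetD M 0 []).length : Int) 1).foldl (fun ans j =>
        if PySem.List.pyGetD (PySem.List.pyGetD M i []) j 0 = 0 then
          ans
          + (if i - 1 > -1 ∧ PySem.List.pyGetD (PySem.List.pyGetD M (i - 1) []) j 0 = 1 then 1 else 0)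
          + (if j - 1 > -1 ∧ PySem.List.pyGetD (PySem.List.pyGetD M i []) (j - 1) 0 = 1 then 1 else 0)
          + (if i + 1 < (M.length : Int) ∧ PySem.List.pyGetD (PySem.List.pyGetD M (i + 1) []) j 0 = 1 then 1 else 0)
          + (if j + 1 < ((PySem.List.pyGetD M 0 []).length : Int) ∧ PySem.List.pyGetD (PySem.List.pyGetD M i []) (j + 1) 0 = 1 then 1 else 0)
        else ans) ans)
      = fun ans i => (PySem.List.pyRange 0 ((PySem.List.pyGetD M 0 []).length : Int) 1).foldl
          (fun ans j => ans + pv_gA M i j) ans := by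
    funext ans i
    congr 1
    funext ans j
    unfold pv_gA
    split_ifs <;> ring
  show (PySem.List.pyRange 0 (M.length : Int) 1).foldl _ 0 = _
  rw [hfun]
  have hget0 : PySem.List.pyGetD M 0 [] = M.getD 0 [] := by
    simpa using PySem.List.pyGetD_natCast M 0 []
  rw [hget0]
  have hinner : (fun (ans i : Int) => (PySem.List.pyRange 0 ((M.getD 0 []).length : Int) 1).foldl
      (fun ans j => ans + pv_gA M i j) ans)
      = fun ans i => ans + ∑ k ∈ Finset.range (M.getD 0 []).length, pv_gA M i (k : Int) := by
    funext ans i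
    exact pv_foldl_sum (pv_gA M i) ((M.getD 0 []).length) ans
  rw [hinner, pv_foldl_sum (fun i => ∑ k ∈ Finset.range (M.getD 0 []).length, pv_gA M i k) M.length 0]
  rw [zero_add]
  exact Finset.sum_congr rfl fun i _ => Finset.sum_congr rfl fun j _ => pv_gA_cast M i j

-- B as the two edge-pass Finset sums
theorem pv_B_eq (M : List (List Int)) :
    findCoverage_alt M
      = (∑ i ∈ Finset.range M.length, ∑ j ∈ Finset.range ((M.getD 0 []).length - 1),
          (if (pvCell M i j = 0 ∧ pvCell M i (j + 1) = 1) ∨ (pvCell M i j = 1 ∧ pvCell M i (j + 1) = 0) then (1 : Int) else 0))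
        + ∑ i ∈ Finset.range (M.length - 1), ∑ j ∈ Finset.range (M.getD 0 []).length,
            (if (pvCell M i j = 0 ∧ pvCell M (i + 1) j = 1) ∨ (pvCell M i j = 1 ∧ pvCell M (i + 1) j = 0) then (1 : Int) else 0) := by
  unfold findCoverage_alt
  by_cases hM : M = []
  · simp [hM]
  · rw [if_neg hM]
    have hget0 : PySem.List.pyGetD M 0 [] = M.getD 0 [] := by
      simpa using PySem.List.pyGetD_natCast M 0 []
    simp only [hget0]
    have hH : (fun (ans i : Int) => (PySem.List.pyRange 0 (((M.getD 0 []).length : Int) - 1) 1).foldl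
        (fun ans j =>
          if (PySem.List.pyGetD (PySem.List.pyGetD M i []) j 0 = 0 ∧ PySem.List.pyGetD (PySem.List.pyGetD M i []) (j + 1) 0 = 1)
              ∨ (PySem.List.pyGetD (PySem.List.pyGetD M i []) j 0 = 1 ∧ PySem.List.pyGetD (PySem.List.pyGetD M i []) (j + 1) 0 = 0)
          then ans + 1 else ans) ans)
        = fun ans i => (PySem.List.pyRange 0 (((M.getD 0 []).length : Int) - 1) 1).foldl
            (fun ans j => ans + pv_gH M i j) ans := by
      funext ans i
      congr 1
      funext ans j
      unfold pv_gH
      split_ifs <;> ring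
    have hV : (fun (ans i : Int) => (PySem.List.pyRange 0 ((M.getD 0 []).length : Int) 1).foldl
        (fun ans j =>
          if (PySem.List.pyGetD (PySem.List.pyGetD M i []) j 0 = 0 ∧ PySem.List.pyGetD (PySem.List.pyGetD M (i + 1) []) j 0 = 1)
              ∨ (PySem.List.pyGetD (PySem.List.pyGetD M i []) j 0 = 1 ∧ PySem.List.pyGetD (PySem.List.pyGetD M (i + 1) []) j 0 = 0)
          then ans + 1 else ans) ans)
        = fun ans i => (PySem.List.pyRange 0 ((M.getD 0 []).length : Int) 1).foldl
            (fun ans j => ans + pv_gV M i j) ans := by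
      funext ans i
      congr 1
      funext ans j
      unfold pv_gV
      split_ifs <;> ring
    rw [hH, hV]
    have en : (((M.getD 0 []).length : Int) - 1) = (((M.getD 0 []).length - 1 : Nat) : Int) ∨ (M.getD 0 []).length = 0 := by
      rcases Nat.eq_zero_or_pos (M.getD 0 []).length with h | h
      · exact Or.inr h
      · exact Or.inl (by omega)
    have em : ((M.length : Int) - 1) = ((M.length - 1 : Nat) : Int) := by
      have : M.length ≠ 0 := fun h => hM (List.eq_nil_of_length_eq_zero h)
      omega
    -- inner horizontal folds to sums
    have hHs : (fun (ans i : Int) => (PySem.List.pyRange 0 (((M.getD 0 []).length : Int) - 1) 1).foldl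
        (fun ans j => ans + pv_gH M i j) ans)
        = fun ans i => ans + ∑ k ∈ Finset.range ((M.getD 0 []).length - 1), pv_gH M i (k : Int) := by
      funext ans i
      rcases en with e | e
      · rw [e]; exact pv_foldl_sum (pv_gH M i) ((M.getD 0 []).length - 1) ans
      · rw [e]; simp [PySem.List.pyRange_one_eq_nil]
    have hVs : (fun (ans i : Int) => (PySem.List.pyRange 0 ((M.getD 0 []).length : Int) 1).foldl
        (fun ans j => ans + pv_gV M i j) ans)
        = fun ans i => ans + ∑ k ∈ Finset.range ((M.getD 0 []).length), pv_gV M i (k : Int) := by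
      funext ans i
      exact pv_foldl_sum (pv_gV M i) ((M.getD 0 []).length) ans
    rw [hHs, hVs]
    rw [pv_foldl_sum (fun i => ∑ k ∈ Finset.range ((M.getD 0 []).length - 1), pv_gH M i k) M.length 0, zero_add]
    rw [em, pv_foldl_sum (fun i => ∑ k ∈ Finset.range ((M.getD 0 []).length), pv_gV M i k) (M.length - 1) _]
    congr 1
    · exact Finset.sum_congr rfl fun i _ => Finset.sum_congr rfl fun j _ => pv_gH_cast M i j
    · exact Finset.sum_congr rfl fun i _ => Finset.sum_congr rfl fun j _ => pv_gV_cast M i j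

-- ===== VERDICT (by name: the statement is the Claim_ definition above) =====
theorem findCoverage_spec : Claim_equal_findCoverage := by
  intro M _ _
  unfold Spec_findCoverage
  rw [pv_A_eq M, pv_B_eq M]
  have hhoriz : ∀ i, (∑ j ∈ Finset.range (M.getD 0 []).length,
      ((if 1 ≤ j ∧ (pvCell M i j = 0 ∧ pvCell M i (j - 1) = 1) then (1 : Int) else 0)
        + (if j + 1 < (M.getD 0 []).length ∧ (pvCell M i j = 0 ∧ pvCell M i (j + 1) = 1) then (1 : Int) else 0)))
      = ∑ j ∈ Finset.range ((M.getD 0 []).length - 1),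
          (if (pvCell M i j = 0 ∧ pvCell M i (j + 1) = 1) ∨ (pvCell M i j = 1 ∧ pvCell M i (j + 1) = 0) then (1 : Int) else 0) :=
    fun i => pv_key1D (fun j => pvCell M i j) ((M.getD 0 []).length)
  have hvert : ∀ j, (∑ i ∈ Finset.range M.length,
      ((if 1 ≤ i ∧ (pvCell M i j = 0 ∧ pvCell M (i - 1) j = 1) then (1 : Int) else 0)
        + (if i + 1 < M.length ∧ (pvCell M i j = 0 ∧ pvCell M (i + 1) j = 1) then (1 : Int) else 0)))
      = ∑ i ∈ Finset.range (M.length - 1),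
          (if (pvCell M i j = 0 ∧ pvCell M (i + 1) j = 1) ∨ (pvCell M i j = 1 ∧ pvCell M (i + 1) j = 0) then (1 : Int) else 0) :=
    fun j => pv_key1D (fun i => pvCell M i j) M.length
  calc
    (∑ i ∈ Finset.range M.length, ∑ j ∈ Finset.range (M.getD 0 []).length,
        ((if 1 ≤ i ∧ (pvCell M i j = 0 ∧ pvCell M (i - 1) j = 1) then (1 : Int) else 0)
          + (if 1 ≤ j ∧ (pvCell M i j = 0 ∧ pvCell M i (j - 1) = 1) then (1 : Int) else 0)
          + (if i + 1 < M.length ∧ (pvCell M i j = 0 ∧ pvCell M (i + 1) j = 1) then (1 : Int) else 0)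
          + (if j + 1 < (M.getD 0 []).length ∧ (pvCell M i j = 0 ∧ pvCell M i (j + 1) = 1) then (1 : Int) else 0)))
        = (∑ i ∈ Finset.range M.length, ∑ j ∈ Finset.range (M.getD 0 []).length,
            ((if 1 ≤ j ∧ (pvCell M i j = 0 ∧ pvCell M i (j - 1) = 1) then (1 : Int) else 0)
              + (if j + 1 < (M.getD 0 []).length ∧ (pvCell M i j = 0 ∧ pvCell M i (j + 1) = 1) then (1 : Int) else 0)))
          + (∑ i ∈ Finset.range M.length, ∑ j ∈ Finset.range (M.getD 0 []).length,
              ((if 1 ≤ i ∧ (pvCell M i j = 0 ∧ pvCell M (i - 1) j = 1) then (1 : Int) else 0)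
                + (if i + 1 < M.length ∧ (pvCell M i j = 0 ∧ pvCell M (i + 1) j = 1) then (1 : Int) else 0))) := by
        rw [← Finset.sum_add_distrib]
        apply Finset.sum_congr rfl; intro i _
        rw [← Finset.sum_add_distrib]
        apply Finset.sum_congr rfl; intro j _
        ring
    _ = (∑ i ∈ Finset.range M.length, ∑ j ∈ Finset.range ((M.getD 0 []).length - 1),
          (if (pvCell M i j = 0 ∧ pvCell M i (j + 1) = 1) ∨ (pvCell M i j = 1 ∧ pvCell M i (j + 1) = 0) then (1 : Int) else 0))
        + ∑ i ∈ Finset.range (M.length - 1), ∑ j ∈ Finset.range (M.getD 0 []).length,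
            (if (pvCell M i j = 0 ∧ pvCell M (i + 1) j = 1) ∨ (pvCell M i j = 1 ∧ pvCell M (i + 1) j = 0) then (1 : Int) else 0) := by
        congr 1
        · exact Finset.sum_congr rfl (fun i _ => hhoriz i)
        · rw [Finset.sum_comm]
          rw [Finset.sum_congr rfl (fun j _ => hvert j)]
          rw [Finset.sum_comm]
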